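-- pv_equiv track=rewrite | github.com/s1anden/adventofcode2017 | day1/captcha.py | solveCaptchaNextDigit
-- ===== SOURCE A (Python) =====
-- def solveCaptchaNextDigit(input):
--     sum = 0
--     for idx in range(len(input)):
--         digit = input[idx]
--         next = input[(idx + 1) % len(input)]
--         if digit == next:
--             sum += int(digit)
--     return sum
-- ===== SOURCE B (Python) =====
-- from itertools import groupby
--
-- def solveCaptchaNextDigit(input):
--     if not input:
--         return 0
--     total = 0
--     for d, g in groupby(input):
--         r = sum(1 for _ in g)
--         if r > 1:
--             total += (r - 1) * int(d)
--     if input[0] == input[-1]: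
--         total += int(input[0])
--     return total
-- ===== Notes on version B (the rewrite author's own statement) =====
-- stated objective: alternative
-- what changed: Replaces A's index loop with modulo lookup of the circular successor by a run-length (groupby) decomposition: each run of r equal digits contributes (r-1) internal matches, plus one explicit wrap term when the first and last characters agree.
-- outside the precondition, e.g. on solveCaptchaNextDigit('aa'): A raises ValueError, B raises ValueError
import Mathlib
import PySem

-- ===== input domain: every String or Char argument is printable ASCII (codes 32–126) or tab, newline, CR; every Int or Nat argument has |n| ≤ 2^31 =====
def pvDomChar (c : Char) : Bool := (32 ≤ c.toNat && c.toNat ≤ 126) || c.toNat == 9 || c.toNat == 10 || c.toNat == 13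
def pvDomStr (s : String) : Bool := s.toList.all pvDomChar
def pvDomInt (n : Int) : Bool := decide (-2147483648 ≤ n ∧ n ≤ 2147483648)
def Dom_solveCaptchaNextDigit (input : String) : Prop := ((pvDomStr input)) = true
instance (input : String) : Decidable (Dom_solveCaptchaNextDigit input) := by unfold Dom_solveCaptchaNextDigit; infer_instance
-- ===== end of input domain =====

-- B replaces A's index-and-modulo scan by a run-length (groupby) decomposition plus one explicit wrap term; objective: alternative decomposition, same cost.

-- ===== PORT A =====
def solveCaptchaNextDigit (input : String) : Int :=
  let l := input.toList
  let n : Int := l.length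
  (PySem.List.pyRange 0 n 1).foldl (fun sum idx =>
    -- idx ∈ range(n) is always in range, so the pyGetD default ' ' is never returned
    let digit := PySem.List.pyGetD l idx ' '
    let next := PySem.List.pyGetD l (PySem.Int.mod (idx + 1) n) ' '
    -- int(digit): under Pre_ digit is an ASCII digit, so ofChars? is some and the getD 0 default is unreached
    if digit = next then sum + (PySem.Int.ofChars? [digit]).getD 0 else sum) 0

-- ===== PORT B =====
-- itertools.groupby over characters: list of (key, materialised group)
def pyGroupby (l : List Char) : List (Char × List Char) :=
  match l with
  | [] => []
  | c :: cs => (c, c :: cs.takeWhile (· == c)) :: pyGroupby (cs.dropWhile (· == c))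
termination_by l.length
decreasing_by
  simpa using Nat.lt_succ_of_le (List.length_dropWhile_le (· == c) cs)

def solveCaptchaNextDigit_alt (input : String) : Int :=
  let l := input.toList
  if l.isEmpty then 0
  else
    let total := (pyGroupby l).foldl (fun total dg =>
      let r : Int := dg.2.length              -- r = sum(1 for _ in g)
      -- int(d): under Pre_ every repeated character is an ASCII digit, so the getD 0 default is unreached
      if r > 1 then total + (r - 1) * (PySem.Int.ofChars? [dg.1]).getD 0 else total) 0
    -- wrap: input[0] == input[-1]
    if PySem.List.pyGetD l 0 ' ' = PySem.List.pyGetD l (-1) ' '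
    then total + (PySem.Int.ofChars? [PySem.List.pyGetD l 0 ' ']).getD 0
    else total

-- ===== PRECONDITION & SPEC =====
-- Pre_ excludes exactly the inputs on which Python A raises ValueError: some position whose
-- character equals its circular successor but is not an ASCII digit (int(c) fails there).
def Pre_solveCaptchaNextDigit (input : String) : Prop :=
  ∀ i, i < input.toList.length →
    input.toList.getD i ' ' = input.toList.getD ((i + 1) % input.toList.length) ' ' →
    (input.toList.getD i ' ').isDigit = true
instance (input : String) : Decidable (Pre_solveCaptchaNextDigit input) := by
  unfold Pre_solveCaptchaNextDigit; infer_instance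
def pvWitness_solveCaptchaNextDigit : String := "91212129"

def Spec_solveCaptchaNextDigit (input : String) (out : Int) : Prop := out = solveCaptchaNextDigit_alt input
instance (input : String) (out : Int) : Decidable (Spec_solveCaptchaNextDigit input out) := by unfold Spec_solveCaptchaNextDigit; infer_instance

-- ===== CLAIM (what is proved, stated in full; the proofs are below) =====
def Claim_equal_solveCaptchaNextDigit : Prop := ∀ (input : String), Dom_solveCaptchaNextDigit input → Pre_solveCaptchaNextDigit input → Spec_solveCaptchaNextDigit input (solveCaptchaNextDigit input)

-- ===== LEMMAS AND PROOFS =====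

-- value of int(c) as both ports compute it
def pvVal (c : Char) : Int := (PySem.Int.ofChars? [c]).getD 0

-- non-circular adjacent-equal sum
def pvAdj : List Char → Int
  | [] => 0
  | [_] => 0
  | a :: b :: t => (if a = b then pvVal a else 0) + pvAdj (b :: t)

lemma foldl_ite_add {α : Type} (p : α → Prop) [DecidablePred p] (g : α → Int) (l : List α) (a : Int) :
    l.foldl (fun s x => if p x then s + g x else s) a
      = a + (l.map fun x => if p x then g x else 0).sum := by
  have h : (fun (s : Int) x => if p x then s + g x else s)
      = fun (s : Int) x => s + (if p x then g x else 0) := by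
    funext s x; split <;> simp
  rw [h, PySem.List.foldl_add]

lemma range_sum_eq_pvAdj (l : List Char) :
    ((List.range (l.length - 1)).map
      (fun k => if l.getD k ' ' = l.getD (k + 1) ' ' then pvVal (l.getD k ' ') else 0)).sum
      = pvAdj l := by
  induction l with
  | nil => simp [pvAdj]
  | cons a t ih =>
    cases t with
    | nil => simp [pvAdj]
    | cons b t' =>
      rw [show (a :: b :: t').length - 1 = ((b :: t').length - 1) + 1 by simp,
        List.range_succ_eq_map]
      simp only [List.map_cons, List.map_map, List.sum_cons]
      have : ((List.range ((b :: t').length - 1)).map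
          (fun k => if (a :: b :: t').getD (k + 1) ' ' = (a :: b :: t').getD (k + 1 + 1) ' '
            then pvVal ((a :: b :: t').getD (k + 1) ' ') else 0)).sum
          = pvAdj (b :: t') := by
        rw [← ih]; congr 1
      simp only [List.getD_cons_succ, List.getD_cons_zero] at this ⊢
      rw [pvAdj]
      rw [← this]
      congr 1

lemma adj_span (c : Char) (cs : List Char) :
    pvAdj (c :: cs)
      = ((cs.takeWhile (· == c)).length : Int) * pvVal c + pvAdj (cs.dropWhile (· == c)) := by
  induction cs generalizing c with
  | nil => simp [pvAdj]
  | cons b t ih =>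
    by_cases hb : b = c
    · subst hb
      have ihb := ih b
      rw [List.takeWhile_cons, List.dropWhile_cons]
      simp only [BEq.rfl, if_pos, List.length_cons]
      rw [pvAdj, if_pos rfl, ihb]
      push_cast
      ring
    · rw [List.takeWhile_cons, List.dropWhile_cons]
      have : (b == c) = false := by simp [hb]
      rw [this]
      simp only [Bool.false_eq_true, if_false, List.length_nil]
      rw [pvAdj, if_neg (by exact fun h => hb h.symm)]
      simp

lemma groupby_sum_eq_pvAdj (l : List Char) :
    ((pyGroupby l).map
      (fun dg => if ((dg.2.length : Int)) > 1 then ((dg.2.length : Int) - 1) * pvVal dg.1 else 0)).sum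
      = pvAdj l := by
  induction l using pyGroupby.induct with
  | case1 => simp [pyGroupby, pvAdj]
  | case2 c cs ih =>
    rw [pyGroupby]
    simp only [List.map_cons, List.sum_cons]
    rw [ih, adj_span]
    set m := (cs.takeWhile (· == c)).length with hm
    by_cases h0 : m = 0
    · rw [if_neg (by simp only [List.length_cons, ← hm, h0]; norm_num)]
      simp [h0]
    · have h1 : ((c :: cs.takeWhile (· == c)).length : Int) > 1 := by
        simp only [List.length_cons, ← hm]; omega
      rw [if_pos h1]
      simp only [List.length_cons, ← hm]
      push_cast
      ring

-- ===== VERDICT (by name: the statement is the Claim_ definition above) =====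
theorem solveCaptchaNextDigit_spec : Claim_equal_solveCaptchaNextDigit := by
  intro input _hdom _hpre
  unfold Spec_solveCaptchaNextDigit
  unfold solveCaptchaNextDigit solveCaptchaNextDigit_alt
  simp only []
  set l := input.toList with hl
  by_cases hnil : l = []
  · simp [hnil]
  · have hpos : 0 < l.length := List.length_pos_iff.mpr hnil
    have hnotE : l.isEmpty = false := by simp [hnil]
    rw [if_neg (by simp [hnotE])]
    -- convert both folds to sums
    rw [foldl_ite_add (fun idx => PySem.List.pyGetD l idx ' '
        = PySem.List.pyGetD l (PySem.Int.mod (idx + 1) (l.length : Int)) ' ')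
      (fun idx => (PySem.Int.ofChars? [PySem.List.pyGetD l idx ' ']).getD 0)]
    rw [foldl_ite_add (fun dg : Char × List Char => ((dg.2.length : Int)) > 1)
      (fun dg : Char × List Char => ((dg.2.length : Int) - 1) * (PySem.Int.ofChars? [dg.1]).getD 0)]
    simp only [zero_add]
    -- split the range at the last index
    have hsplit : PySem.List.pyRange 0 (l.length : Int) 1
        = PySem.List.pyRange 0 ((l.length : Int) - 1) 1 ++ [(l.length : Int) - 1] := by
      rw [← PySem.List.pyRange_one_succ_right (by omega : (0:Int) ≤ (l.length:Int) - 1)]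
      congr 1; omega
    rw [hsplit, List.map_append, List.sum_append]
    -- the last (wrap) term
    have hmodlast : PySem.Int.mod ((l.length : Int) - 1 + 1) (l.length : Int) = 0 := by
      rw [show ((l.length : Int) - 1 + 1) = (l.length : Int) by ring,
        PySem.Int.mod_eq_emod_of_pos (by exact_mod_cast hpos), Int.emod_self]
    have hlast : PySem.List.pyGetD l ((l.length : Int) - 1) ' ' = l.getD (l.length - 1) ' ' := by
      rw [show ((l.length : Int) - 1) = ((l.length - 1 : Nat) : Int) by omega,
        PySem.List.pyGetD_natCast]
    have hneg1 : PySem.List.pyGetD l (-1) ' ' = l.getD (l.length - 1) ' ' := by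
      rw [PySem.List.pyGetD_neg_one l ' ' hnil, List.getLast_eq_getElem,
        List.getD_eq_getElem l ' ' (by omega)]
    have hzero : PySem.List.pyGetD l 0 ' ' = l.getD 0 ' ' := PySem.List.pyGetD_zero l ' '
    -- the middle terms: mod is the identity there, giving the non-circular adjacent sum
    have hmid : ((PySem.List.pyRange 0 ((l.length : Int) - 1) 1).map
        (fun idx => if PySem.List.pyGetD l idx ' '
            = PySem.List.pyGetD l (PySem.Int.mod (idx + 1) (l.length : Int)) ' '
          then (PySem.Int.ofChars? [PySem.List.pyGetD l idx ' ']).getD 0 else 0)).sum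
        = pvAdj l := by
      rw [PySem.List.pyRange_one, List.map_map]
      have hlen : (((l.length : Int) - 1) - 0).toNat = l.length - 1 := by omega
      rw [hlen, ← range_sum_eq_pvAdj l]
      congr 1
      apply List.map_congr_left
      intro k hk
      simp only [List.mem_range] at hk
      have hmod : PySem.Int.mod ((k : Int) + 1) (l.length : Int) = ((k + 1 : Nat) : Int) := by
        rw [PySem.Int.mod_eq_emod_of_pos (by exact_mod_cast hpos)]
        rw [Int.emod_eq_of_lt (by omega) (by omega)]
        push_cast
        ring
      simp only [Function.comp, zero_add, hmod, PySem.List.pyGetD_natCast, pvVal]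
    rw [hmid, ← groupby_sum_eq_pvAdj l]
    simp only [List.map_cons, List.map_nil, List.sum_cons, List.sum_nil, hmodlast, hlast,
      hneg1, hzero, pvVal, add_zero]
    by_cases hw : l.getD (l.length - 1) ' ' = l.getD 0 ' '
    · rw [if_pos hw, if_pos hw.symm, hw]
    · rw [if_neg hw, if_neg (fun h => hw h.symm)]; ring
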